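-- pv_equiv track=rewrite | github.com/ardacey/Lexo | lexo-backend/core/rate_limiting.py | validate_user_agent
-- ===== SOURCE A (Python) =====
-- def validate_user_agent(user_agent: str) -> bool:
--     if not user_agent or user_agent in ["unknown", ""]:
--         return False
--
--     bot_patterns = ["bot", "crawler", "spider", "scraper", "curl", "wget", "python-requests"]
--     user_agent_lower = user_agent.lower()
--
--     for pattern in bot_patterns:
--         if pattern in user_agent_lower:
--             return False
--
--     return True
-- ===== SOURCE B (Python) =====
-- def validate_user_agent(user_agent: str) -> bool:
--     if not user_agent or user_agent in ["unknown", ""]: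
--         return False
--
--     patterns = ("bot", "crawler", "spider", "scraper", "curl", "wget", "python-requests")
--     s = user_agent.lower()
--
--     # single position-major pass: at each index, test whether any pattern starts there
--     for i in range(len(s)):
--         if any(s.startswith(p, i) for p in patterns):
--             return False
--     return True
-- ===== Notes on version B (the rewrite author's own statement) =====
-- stated objective: alternative
-- what changed: Replaces seven independent substring scans ('pattern in s' per pattern) with one position-major pass over the lowered string that tests at each index whether any pattern starts there (s.startswith(p, i)).
import Mathlib
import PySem

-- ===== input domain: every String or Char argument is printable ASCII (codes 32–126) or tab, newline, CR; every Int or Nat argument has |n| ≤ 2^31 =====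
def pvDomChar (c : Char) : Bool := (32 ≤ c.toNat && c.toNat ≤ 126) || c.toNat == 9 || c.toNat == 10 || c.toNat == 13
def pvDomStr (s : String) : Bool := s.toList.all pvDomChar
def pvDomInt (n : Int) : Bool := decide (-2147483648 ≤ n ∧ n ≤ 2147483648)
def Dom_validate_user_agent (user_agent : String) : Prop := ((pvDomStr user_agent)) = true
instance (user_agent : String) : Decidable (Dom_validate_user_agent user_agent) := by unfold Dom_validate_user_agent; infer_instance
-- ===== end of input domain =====

-- B replaces A's seven independent 'pattern in s' substring scans by one position-major
-- pass testing at each index whether any pattern starts there (objective: alternative).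

-- ===== PORT A =====
def pvBotPatterns : List String :=
  ["bot", "crawler", "spider", "scraper", "curl", "wget", "python-requests"]

-- A's for-loop with early return, pattern-major: 'pattern in user_agent_lower'
def pvLoopA : List String → String → Bool
  | [], _ => true
  | p :: ps, s => if PySem.Str.isIn p s then false else pvLoopA ps s

def validate_user_agent (user_agent : String) : Bool :=
  if user_agent == "" || (user_agent == "unknown" || user_agent == "") then false
  else pvLoopA pvBotPatterns (PySem.Str.lower user_agent)

-- ===== PORT B =====
-- B's inner 'any(s.startswith(p, i) …)': do the bot patterns start at this position?
def pvHitHere (l : List Char) : Bool :=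
  pvBotPatterns.any (fun p => PySem.Chars.startswith l p.toList)

-- B's position-major pass: 'for i in range(len(s))' as recursion over suffixes
def pvScanB : List Char → Bool
  | [] => false
  | c :: rest => if pvHitHere (c :: rest) then true else pvScanB rest

def validate_user_agent_alt (user_agent : String) : Bool :=
  if user_agent == "" || (user_agent == "unknown" || user_agent == "") then false
  else !(pvScanB (PySem.Str.lower user_agent).toList)

-- ===== PRECONDITION & SPEC =====
def Spec_validate_user_agent (user_agent : String) (out : Bool) : Prop := out = validate_user_agent_alt user_agent
instance (user_agent : String) (out : Bool) : Decidable (Spec_validate_user_agent user_agent out) := by unfold Spec_validate_user_agent; infer_instance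

-- ===== CLAIM (what is proved, stated in full; the proofs are below) =====
def Claim_equal_validate_user_agent : Prop := ∀ (user_agent : String), Dom_validate_user_agent user_agent → Spec_validate_user_agent user_agent (validate_user_agent user_agent)

-- ===== LEMMAS AND PROOFS =====

-- A's early-return loop returns false iff some pattern occurs as a substring
theorem pvLoopA_eq_false_iff (ps : List String) (s : String) :
    pvLoopA ps s = false ↔ ∃ p ∈ ps, p.toList <:+: s.toList := by
  induction ps with
  | nil => simp [pvLoopA]
  | cons p ps ih =>
    simp only [pvLoopA]
    by_cases h : PySem.Str.isIn p s = true
    · rw [h]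
      simp [(PySem.Str.isIn_iff_infix p s).mp h]
    · have hni : ¬ p.toList <:+: s.toList := by
        intro hinf; exact h ((PySem.Str.isIn_iff_infix p s).mpr hinf)
      simp only [h, Bool.false_eq_true, if_false, ih, List.mem_cons]
      constructor
      · rintro ⟨q, hq, hinf⟩; exact ⟨q, Or.inr hq, hinf⟩
      · rintro ⟨q, hq, hinf⟩
        rcases hq with rfl | hq
        · exact absurd hinf hni
        · exact ⟨q, hq, hinf⟩

-- B's position-major scan finds exactly the (nonempty) patterns occurring as substrings
theorem pvScanB_eq_true_iff (l : List Char) :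
    pvScanB l = true ↔ ∃ p ∈ pvBotPatterns, p.toList <:+: l := by
  induction l with
  | nil =>
    simp only [pvScanB, Bool.false_eq_true, false_iff]
    rintro ⟨p, hp, hinf⟩
    have hne : p.toList ≠ [] := by
      fin_cases hp <;> simp
    exact hne (List.infix_nil.mp hinf)
  | cons c rest ih =>
    simp only [pvScanB]
    by_cases h : pvHitHere (c :: rest) = true
    · simp only [h, if_true, true_iff]
      rcases List.any_eq_true.mp h with ⟨p, hp, hpre⟩
      exact ⟨p, hp, ((PySem.Chars.startswith_iff _ _).mp hpre).isInfix⟩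
    · have hno : ∀ p ∈ pvBotPatterns, ¬ p.toList <+: (c :: rest) := by
        intro p hp hpre
        exact h (List.any_eq_true.mpr ⟨p, hp, (PySem.Chars.startswith_iff _ _).mpr hpre⟩)
      simp only [h, Bool.false_eq_true, if_false, ih]
      constructor
      · rintro ⟨p, hp, hinf⟩; exact ⟨p, hp, List.infix_cons_iff.mpr (Or.inr hinf)⟩
      · rintro ⟨p, hp, hinf⟩
        rcases List.infix_cons_iff.mp hinf with hpre | hinf'
        · exact absurd hpre (hno p hp)
        · exact ⟨p, hp, hinf'⟩

-- ===== VERDICT (by name: the statement is the Claim_ definition above) =====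
theorem validate_user_agent_spec : Claim_equal_validate_user_agent := by
  intro ua _
  unfold Spec_validate_user_agent validate_user_agent validate_user_agent_alt
  split
  · rfl
  · have key : pvLoopA pvBotPatterns (PySem.Str.lower ua)
        = !(pvScanB (PySem.Str.lower ua).toList) := by
      rcases hb : pvScanB (PySem.Str.lower ua).toList with _ | _
      · -- scan found nothing: loop must return true
        rcases hl : pvLoopA pvBotPatterns (PySem.Str.lower ua) with _ | _
        · exfalso
          rcases (pvLoopA_eq_false_iff _ _).mp hl with ⟨p, hp, hinf⟩
          have := (pvScanB_eq_true_iff ((PySem.Str.lower ua).toList)).mpr ⟨p, hp, hinf⟩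
          rw [hb] at this
          exact absurd this (by decide)
        · rfl
      · -- scan found a pattern: loop returns false
        rcases (pvScanB_eq_true_iff _).mp hb with ⟨p, hp, hinf⟩
        have := (pvLoopA_eq_false_iff pvBotPatterns (PySem.Str.lower ua)).mpr ⟨p, hp, hinf⟩
        simpa using this
    exact key.symm ▸ rfl
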